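-- pv_equiv track=rewrite | github.com/spencerajo/Safety-Slip | SafetySlip_Final1.py | process_line
-- ===== SOURCE A (Python) =====
-- def process_line(myList): #RETURN INT ; myList is an integer list
--     voltage = False #boolean declaring whether we are in 0 or 8 state
--     full_cycles = 0 #how many times we have gone 0 -> 8 -> 0
--     threshold = 6
--     def process_digit(n, voltsOn): #n - integer voltsOn- Boolean RETURN INTEGER
--         """
--         0 = normal step (or cancel attempt to state change)
--         1 = digit recieved that should initiate state change attempt
--         """
--         if n >= 6 and voltsOn or n < 6 and not voltsOn:
--             return 0
--         else: #attempt to change state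
--             return 1
--     def look_ahead(subList, voltsOn): #RETURN BOOL ; subList is an integer list
--         """
--         Function to look ahead and determine if state change need to occur
--
--         Assume we will switch until proven wrong
--         """
--         doSwitch = True
--         if len(subList) < 5:
--             return False
--         for i in subList:
--             if voltsOn:
--                 if i >= threshold:#was 6
--                     doSwitch = False
--                     break
--                 else:
--                     doSwitch = True
--             else:
--                 if i < threshold: #was 6
--                     doSwitch = False
--                     break
--                 else:
--                     doSwitch = True
--         return doSwitch
--     def determine_light(cycles, voltsOn):#Return an integer ; cycles - int ; voltsOn - boolean
--         """
--         1 = red; -1 = yellow; 2 = green; 3 = cautious continue; 4 = all_zeros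
--         """
--         if cycles == 0 and not voltsOn: #nothing ever turned on
--             return 4
--         elif cycles > 1 or cycles == 1 and voltsOn: #second voltage
--             return 1
--         elif cycles == 1 and not voltsOn: #single reading
--             return 2
--         else:
--             return -1
--     for i in range(len(myList)):
--         result = process_digit(myList[i], voltage)
--         if result == 1:
--             if look_ahead(myList[i:min(i+5, len(myList))],voltage):
--                 voltage = not voltage
--                 if not voltage:
--                     full_cycles += 1
--     return determine_light(full_cycles, voltage)
-- ===== SOURCE B (Python) =====
-- def process_line(myList):
--     voltage = False
--     full_cycles = 0
--     run = 0
--     for x in myList: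
--         flip = (x < 6) if voltage else (x >= 6)
--         if flip:
--             run += 1
--             if run == 5:
--                 voltage = not voltage
--                 if not voltage:
--                     full_cycles += 1
--                 run = 0
--         else:
--             run = 0
--     if full_cycles == 0 and not voltage:
--         return 4
--     elif full_cycles > 1 or (full_cycles == 1 and voltage):
--         return 1
--     elif full_cycles == 1 and not voltage:
--         return 2
--     else:
--         return -1
-- ===== Notes on version B (the rewrite author's own statement) =====
-- stated objective: faster
-- what changed: Replaced A's indexed loop that slices and re-scans a 5-element look-ahead window at every flip-side position (via three nested helper functions) by a single pass keeping a running streak counter that toggles the voltage state when five consecutive flip-side readings have been seen.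
import Mathlib
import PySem

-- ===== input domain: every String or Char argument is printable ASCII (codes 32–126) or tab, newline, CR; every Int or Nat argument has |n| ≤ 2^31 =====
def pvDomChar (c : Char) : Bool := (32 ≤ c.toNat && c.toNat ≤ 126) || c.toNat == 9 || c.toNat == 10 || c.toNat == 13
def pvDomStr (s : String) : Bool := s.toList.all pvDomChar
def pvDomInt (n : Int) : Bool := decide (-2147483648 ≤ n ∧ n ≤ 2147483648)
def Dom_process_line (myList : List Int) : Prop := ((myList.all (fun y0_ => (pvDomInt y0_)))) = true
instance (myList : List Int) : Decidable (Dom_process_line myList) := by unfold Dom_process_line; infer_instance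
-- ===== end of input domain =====

-- B replaces A's per-index 5-element look-ahead scan by one pass with a running streak counter (simpler, no slicing).

-- ===== PORT A =====
def process_digit (n : Int) (voltsOn : Bool) : Int :=
  if (6 ≤ n ∧ voltsOn = true) ∨ (n < 6 ∧ voltsOn = false) then 0 else 1

-- the for-loop of look_ahead with its break, as structural recursion over the sublist
def look_ahead_loop (subList : List Int) (voltsOn : Bool) (doSwitch : Bool) : Bool :=
  match subList with
  | [] => doSwitch
  | i :: rest =>
    if voltsOn then
      if 6 ≤ i then false else look_ahead_loop rest voltsOn true
    else
      if i < 6 then false else look_ahead_loop rest voltsOn true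

def look_ahead (subList : List Int) (voltsOn : Bool) : Bool :=
  if subList.length < 5 then false
  else look_ahead_loop subList voltsOn true

def determine_light (cycles : Int) (voltsOn : Bool) : Int :=
  if cycles = 0 ∧ voltsOn = false then 4
  else if cycles > 1 ∨ (cycles = 1 ∧ voltsOn = true) then 1
  else if cycles = 1 ∧ voltsOn = false then 2
  else -1

-- the body of A's main loop (state = (voltage, full_cycles), i the loop index)
def bodyA (myList : List Int) (s : Bool × Int) (i : Int) : Bool × Int :=
  let result := process_digit (PySem.List.pyGetD myList i 0) s.1
  if result = 1 then
    if look_ahead (PySem.List.slice myList (some i) (some (min (i + 5) (myList.length : Int)))) s.1 then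
      let voltage := !s.1
      (voltage, if voltage = false then s.2 + 1 else s.2)
    else s
  else s

def process_line (myList : List Int) : Int :=
  let st := (PySem.List.pyRange 0 (myList.length : Int) 1).foldl (bodyA myList) (false, 0)
  determine_light st.2 st.1

-- ===== PORT B =====
def determine_light_alt (cycles : Int) (voltsOn : Bool) : Int :=
  if cycles = 0 ∧ voltsOn = false then 4
  else if cycles > 1 ∨ (cycles = 1 ∧ voltsOn = true) then 1
  else if cycles = 1 ∧ voltsOn = false then 2
  else -1

-- the body of B's single pass (state = (voltage, full_cycles, run))
def bodyB (s : Bool × Int × Int) (x : Int) : Bool × Int × Int :=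
  let flip := if s.1 then decide (x < 6) else decide (6 ≤ x)
  if flip then
    if s.2.2 + 1 = 5 then
      let v := !s.1
      (v, (if v = false then s.2.1 + 1 else s.2.1), (0 : Int))
    else (s.1, s.2.1, s.2.2 + 1)
  else (s.1, s.2.1, (0 : Int))

def process_line_alt (myList : List Int) : Int :=
  let st := myList.foldl bodyB (false, 0, 0)
  determine_light_alt st.2.1 st.1

-- ===== PRECONDITION & SPEC =====
def Spec_process_line (myList : List Int) (out : Int) : Prop := out = process_line_alt myList
instance (myList : List Int) (out : Int) : Decidable (Spec_process_line myList out) := by unfold Spec_process_line; infer_instance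

-- ===== CLAIM (what is proved, stated in full; the proofs are below) =====
def Claim_equal_process_line : Prop := ∀ (myList : List Int), Dom_process_line myList → Spec_process_line myList (process_line myList)

-- ===== LEMMAS AND PROOFS =====

-- "x is on the side that would flip the voltage state v"
def matchFlip (v : Bool) (x : Int) : Bool := if v then decide (x < 6) else decide (6 ≤ x)

-- A's main loop as structural recursion on the remaining suffix
def recA : List Int → Bool → Int → Bool × Int
  | [], v, c => (v, c)
  | x :: rest, v, c =>
    if process_digit x v = 1 then
      if look_ahead ((x :: rest).take 5) v then
        recA rest (!v) (if v = true then c + 1 else c)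
      else recA rest v c
    else recA rest v c

-- B's pass as structural recursion, returning only (voltage, full_cycles)
def recB : List Int → Bool → Int → Int → Bool × Int
  | [], v, c, _ => (v, c)
  | x :: rest, v, c, r =>
    if matchFlip v x then
      if r + 1 = 5 then recB rest (!v) (if v = true then c + 1 else c) 0
      else recB rest v c (r + 1)
    else recB rest v c 0

lemma pd_eq_one (x : Int) (v : Bool) : process_digit x v = 1 ↔ matchFlip v x = true := by
  cases v <;> simp [process_digit, matchFlip]

lemma band_split {a b : Bool} (h : (a && b) = true) : a = true ∧ b = true := by
  simp only [Bool.and_eq_true] at h; exact h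

lemma matchFlip_not (v : Bool) (x : Int) : matchFlip (!v) x = !(matchFlip v x) := by
  cases v <;> by_cases h : x < 6 <;>
    simp [matchFlip, h, show (6 ≤ x ↔ ¬ (x < 6)) by omega]

lemma la_loop_all (l : List Int) (v : Bool) :
    look_ahead_loop l v true = l.all (matchFlip v) := by
  induction l with
  | nil => rfl
  | cons x rest ih =>
    cases v <;> by_cases h : x < 6 <;>
      simp [look_ahead_loop, matchFlip, h, ih, show (6 ≤ x ↔ ¬ (x < 6)) by omega]

lemma la_take (xs : List Int) (v : Bool) :
    look_ahead (xs.take 5) v = (decide (5 ≤ xs.length) && (xs.take 5).all (matchFlip v)) := by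
  unfold look_ahead
  rw [la_loop_all]
  by_cases h : 5 ≤ xs.length
  · rw [if_neg (by simp [List.length_take]; omega), decide_eq_true h, Bool.true_and]
  · rw [if_pos (by simp [List.length_take]; omega), decide_eq_false h, Bool.false_and]

-- bridge: A's foldl over range(k, len) equals recA on the suffix from k
lemma foldA_eq (full : List Int) (n : Nat) :
    ∀ (k : Nat), full.length - k = n → ∀ (v : Bool) (c : Int),
      (PySem.List.pyRange (k : Int) (full.length : Int) 1).foldl (bodyA full) (v, c)
        = recA (full.drop k) v c := by
  induction n with
  | zero =>
    intro k hk v c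
    have hge : full.length ≤ k := by omega
    rw [PySem.List.pyRange_one_eq_nil (by exact_mod_cast hge)]
    simp [List.drop_eq_nil_of_le hge, recA]
  | succ n ih =>
    intro k hk v c
    have hlt : k < full.length := by omega
    rw [PySem.List.pyRange_one_cons (by exact_mod_cast hlt)]
    have hcast : (k : Int) + 1 = ((k + 1 : Nat) : Int) := by push_cast; ring
    have hget : PySem.List.pyGetD full (k : Int) 0 = full[k] := by
      rw [PySem.List.pyGetD_natCast, List.getD_eq_getElem _ _ hlt]
    have hmin : min ((k : Int) + 5) (full.length : Int) = ((min (k + 5) full.length : Nat) : Int) := by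
      push_cast
      ring_nf
    have hslice : PySem.List.slice full (some (k : Int))
        (some (min ((k : Int) + 5) (full.length : Int))) = (full.drop k).take 5 := by
      rw [hmin, PySem.List.slice_natCast]
      have : (full.drop k).take (min (k + 5) full.length - k) = (full.drop k).take 5 := by
        rw [List.take_eq_take_iff]
        simp [List.length_drop]; omega
      exact this
    have hdrop : full.drop k = full[k] :: full.drop (k + 1) := List.drop_eq_getElem_cons hlt
    rw [List.foldl_cons, hcast]
    rw [ih (k + 1) (by omega)]
    rw [hdrop]
    have hbv : ∀ b : Bool, ((!b) = false) = (b = true) := by intro b; cases b <;> simp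
    simp only [bodyA, hget, hslice, hdrop, recA, hbv]
    split_ifs <;> rfl

-- bridge: B's foldl equals recB
lemma foldB_eq (xs : List Int) : ∀ (v : Bool) (c r : Int),
    (((xs.foldl bodyB (v, c, r)).1, (xs.foldl bodyB (v, c, r)).2.1) : Bool × Int)
      = recB xs v c r := by
  induction xs with
  | nil => intro v c r; rfl
  | cons x rest ih =>
    intro v c r
    have hbv : ∀ b : Bool, ((!b) = false) = (b = true) := by intro b; cases b <;> simp
    simp only [List.foldl_cons, bodyB, recB, hbv]
    by_cases hf : matchFlip v x = true
    · have : (if v = true then decide (x < 6) else decide (6 ≤ x)) = true := by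
        cases v <;> simpa [matchFlip] using hf
      simp only [this, hf, if_true]
      by_cases h5 : r + 1 = 5 <;> simp [h5, ih]
    · have : (if v = true then decide (x < 6) else decide (6 ≤ x)) = false := by
        cases v <;> simpa [matchFlip] using hf
      simp [this, hf, ih]

-- the main invariant: outside a committed 5-window the two recursions agree (first part),
-- and while B is finishing a window A has already toggled (second part)
lemma main_desync : ∀ (n : Nat) (xs : List Int), xs.length = n →
    ((∀ (v : Bool) (c r : Int), 0 ≤ r → r < 5 →
        (r = 0 ∨ ¬ ((5 - r).toNat ≤ xs.length ∧ (xs.take (5 - r).toNat).all (matchFlip v) = true)) →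
        recA xs v c = recB xs v c r)
     ∧ (∀ (v : Bool) (c r : Int), 1 ≤ r → r ≤ 4 →
        (5 - r).toNat ≤ xs.length → (xs.take (5 - r).toNat).all (matchFlip v) = true →
        recB xs v c r = recA xs (!v) (if v = true then c + 1 else c))) := by
  intro n
  induction n using Nat.strong_induction_on with
  | _ n ih =>
    intro xs hlen
    constructor
    · intro v c r hr0 hr5 hyp
      match xs, hlen with
      | [], _ => rfl
      | x :: rest, hlen =>
        have hlen' : rest.length + 1 = n := by simpa using hlen
        have ihrest := ih rest.length (by omega) rest rfl
        by_cases hm : matchFlip v x = true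
        · have hpd : process_digit x v = 1 := (pd_eq_one x v).mpr hm
          by_cases hw : 5 ≤ (x :: rest).length ∧ ((x :: rest).take 5).all (matchFlip v) = true
          · -- the full window matches: A toggles now, B one position from now
            have hla : look_ahead ((x :: rest).take 5) v = true := by
              rw [la_take, decide_eq_true hw.1, hw.2, Bool.and_self]
            have hr : r = 0 := by
              rcases hyp with h0 | hg
              · exact h0
              · exfalso
                apply hg
                constructor
                · omega
                · have hsub : (x :: rest).take (5 - r).toNat = ((x :: rest).take 5).take (5 - r).toNat := by
                    rw [List.take_take]
                    congr 1
                    omega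
                  rw [hsub]
                  have := hw.2
                  simp only [List.all_eq_true] at this ⊢
                  intro a ha
                  exact this a (List.mem_of_mem_take ha)
            subst hr
            have htk : (x :: rest).take 5 = x :: rest.take 4 := rfl
            have hall4 : (rest.take 4).all (matchFlip v) = true := by
              have h2 := hw.2; rw [htk, List.all_cons] at h2; exact (band_split h2).2
            simp only [recA, recB, hpd, hla, hm, if_true]
            rw [if_neg (by norm_num : ¬((0:Int) + 1 = 5))]
            norm_num
            exact (ihrest.2 v c 1 (by omega) (by omega)
              (by have := hw.1; simp at this ⊢; omega) (by simpa using hall4)).symm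
          · -- window does not match: A stays, B cannot reach 5 here
            have hla : look_ahead ((x :: rest).take 5) v = false := by
              rw [la_take]
              by_cases hl : 5 ≤ (x :: rest).length
              · have hb : ((x :: rest).take 5).all (matchFlip v) = false := by
                  cases hb : ((x :: rest).take 5).all (matchFlip v)
                  · rfl
                  · exact absurd ⟨hl, hb⟩ hw
                rw [hb, Bool.and_false]
              · rw [decide_eq_false hl, Bool.false_and]
            have hr4 : ¬ (r + 1 = 5) := by
              intro h5
              have hr' : r = 4 := by omega
              rcases hyp with h0 | hg
              · omega
              · apply hg
                subst hr'
                refine ⟨by simp, ?_⟩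
                rw [show ((5:Int) - 4).toNat = 1 by rfl, show List.take 1 (x :: rest) = [x] by simp]
                simp [hm]
            simp only [recA, recB, hpd, hla, hm, if_true, if_false, hr4]
            apply ihrest.1 v c (r + 1) (by omega) (by omega)
            right
            intro ⟨hlen2, hall2⟩
            have hsplit : ((5:Int) - r).toNat = (5 - (r + 1)).toNat + 1 := by omega
            rcases hyp with h0 | hg
            · subst h0
              apply hw
              refine ⟨by simp only [List.length_cons] at hlen2 ⊢ <;> omega, ?_⟩
              rw [show ((x :: rest).take 5) = x :: rest.take 4 from rfl]
              simp only [List.all_cons, hm, Bool.true_and]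
              simpa using hall2
            · apply hg
              refine ⟨by simp only [List.length_cons] at hlen2 ⊢ <;> omega, ?_⟩
              rw [hsplit, List.take_succ_cons]
              simp only [List.all_cons, hm, Bool.true_and]
              exact hall2
        · -- x does not flip: both reset / stay
          have hpd : process_digit x v ≠ 1 := fun h => hm ((pd_eq_one x v).mp h)
          simp only [recA, recB, hpd, hm, if_false]
          exact ihrest.1 v c 0 le_rfl (by omega) (Or.inl rfl)
    · intro v c r hr1 hr4 hle hall
      match xs, hlen with
      | [], _ => simp at hle; omega
      | x :: rest, hlen =>
        have hlen' : rest.length + 1 = n := by simpa using hlen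
        have ihrest := ih rest.length (by omega) rest rfl
        have hpos : 1 ≤ ((5:Int) - r).toNat := by omega
        have hm : matchFlip v x = true := by
          rcases Nat.exists_eq_add_of_le hpos with ⟨m, hmEq⟩
          rw [show (5 - r).toNat = m + 1 by omega, List.take_succ_cons, List.all_cons] at hall
          exact (band_split hall).1
        have hmNot : matchFlip (!v) x ≠ true := by rw [matchFlip_not, hm]; simp
        have hpdNot : process_digit x (!v) ≠ 1 := fun h => hmNot ((pd_eq_one x (!v)).mp h)
        by_cases h5 : r + 1 = 5
        · -- B toggles now; both sides are now in sync with run 0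
          simp only [recB, recA, hm, hpdNot, if_true, if_false, h5]
          exact (ihrest.1 (!v) (if v = true then c + 1 else c) 0 le_rfl (by omega) (Or.inl rfl)).symm
        · -- B keeps counting; A skips the already-committed element
          have hsplit : ((5:Int) - r).toNat = (5 - (r + 1)).toNat + 1 := by omega
          rw [hsplit, List.take_succ_cons, List.all_cons] at hall
          simp only [recB, recA, hm, hpdNot, if_true, if_false, h5]
          exact ihrest.2 v c (r + 1) (by omega) (by omega)
            (by simp at hle ⊢; omega) (band_split hall).2

lemma recA_eq_recB (xs : List Int) (v : Bool) (c : Int) :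
    recA xs v c = recB xs v c 0 :=
  (main_desync xs.length xs rfl).1 v c 0 le_rfl (by omega) (Or.inl rfl)

-- ===== VERDICT (by name: the statement is the Claim_ definition above) =====
theorem process_line_spec : Claim_equal_process_line := by
  intro myList _
  unfold Spec_process_line process_line process_line_alt
  have hA := foldA_eq myList (myList.length - 0) 0 rfl false 0
  rw [Nat.cast_zero, List.drop_zero] at hA
  rw [hA]
  have hB := foldB_eq myList false 0 0
  have hAB := recA_eq_recB myList false 0
  rw [hAB, ← hB]
  rfl
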